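-- pv_equiv track=rewrite | github.com/124476/Ege | informatika/task_5/code_task_9.py | f
-- ===== SOURCE A (Python) =====
-- def f(n, m):
--     p1 = 1
--     for p in [x for x in str(n) if int(x) % 2 == 1 and x != "0"] + [x for x in str(m) if int(x) % 2 == 1 and x != "0"]:
--         p1 *= int(p)
--
--     p2 = 1
--     for p in [x for x in str(n) if int(x) % 2 == 0 and x != "0"] + [x for x in str(m) if int(x) % 2 == 0 and x != "0"]:
--         p2 *= int(p)
--
--     return abs(p1 - p2)
-- ===== SOURCE B (Python) =====
-- def f(n, m):
--     # Arithmetic digit extraction with two running products (no string building).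
--     # Note: for negative inputs A raises ValueError (int('-')); B processes |x|'s
--     # digits instead -- those inputs are outside Pre_.
--     op, ep = 1, 1
--     for x in (n, m):
--         x = abs(x)
--         while x > 0:
--             d = x % 10
--             if d % 2 == 1:
--                 op *= d
--             elif d != 0:
--                 ep *= d
--             x //= 10
--     return abs(op - ep)
-- ===== Notes on version B (the rewrite author's own statement) =====
-- stated objective: alternative
-- what changed: Replaces the four string-comprehension filters over str(n)/str(m) with pure arithmetic digit extraction (x % 10, x // 10) maintaining two running products in one pass per number.
import Mathlib
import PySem

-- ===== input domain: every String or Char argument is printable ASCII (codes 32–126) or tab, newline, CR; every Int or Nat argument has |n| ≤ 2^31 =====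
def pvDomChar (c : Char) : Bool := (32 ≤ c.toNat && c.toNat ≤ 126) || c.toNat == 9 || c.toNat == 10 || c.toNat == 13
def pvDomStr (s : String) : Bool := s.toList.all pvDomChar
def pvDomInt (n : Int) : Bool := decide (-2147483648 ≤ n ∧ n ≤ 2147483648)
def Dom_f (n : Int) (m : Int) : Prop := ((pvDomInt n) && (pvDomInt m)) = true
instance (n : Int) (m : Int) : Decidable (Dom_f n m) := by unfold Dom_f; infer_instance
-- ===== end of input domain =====

-- B replaces A's four string-comprehension filters over str(n)/str(m) by pure arithmetic
-- digit extraction (x % 10, x // 10) keeping two running products (objective: alternative).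


-- ===== PORT A =====
-- int(x) for a one-character string x; none (Python ValueError, e.g. on '-') only
-- occurs outside Pre_f, so the .getD 0 default is never the value used.
def pvIntv (c : Char) : Int := (PySem.Int.ofChars? [c]).getD 0

-- the comprehension filter 'int(x) % 2 == 1 and x != "0"'
def pvPodd (c : Char) : Bool := (PySem.Int.mod (pvIntv c) 2 == 1) && (c != '0')

-- the comprehension filter 'int(x) % 2 == 0 and x != "0"'
def pvPev (c : Char) : Bool := (PySem.Int.mod (pvIntv c) 2 == 0) && (c != '0')

def f (n : Int) (m : Int) : Int :=
  let p1 := (((PySem.Int.toChars n).filter pvPodd)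
              ++ ((PySem.Int.toChars m).filter pvPodd)).foldl (fun a c => a * pvIntv c) 1
  let p2 := (((PySem.Int.toChars n).filter pvPev)
              ++ ((PySem.Int.toChars m).filter pvPev)).foldl (fun a c => a * pvIntv c) 1
  |p1 - p2|

-- ===== PORT B =====
-- the 'while x > 0' loop of Source B; fuel (= initial x) only makes the recursion
-- structural: x strictly decreases (x // 10 < x), so the fuel never runs out.
def pvLoop (fuel : Nat) (x : Nat) (op ep : Int) : Int × Int :=
  match fuel with
  | 0 => (op, ep)
  | fuel + 1 =>
    if x = 0 then (op, ep)
    else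
      let d := x % 10
      pvLoop fuel (x / 10)
        (if d % 2 = 1 then op * (d : Int) else op)
        (if d % 2 ≠ 1 ∧ d ≠ 0 then ep * (d : Int) else ep)

def f_alt (n : Int) (m : Int) : Int :=
  let (o₁, e₁) := pvLoop n.natAbs n.natAbs 1 1
  let (o₂, e₂) := pvLoop m.natAbs m.natAbs o₁ e₁
  |o₂ - e₂|

-- ===== PRECONDITION & SPEC =====
-- Pre_f excludes exactly the inputs where A raises: for negative n or m, str(x)
-- contains '-' and int('-') raises ValueError.
def Pre_f (n : Int) (m : Int) : Prop := 0 ≤ n ∧ 0 ≤ m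
instance (n : Int) (m : Int) : Decidable (Pre_f n m) := by unfold Pre_f; infer_instance
def pvWitness_f : Int × Int := (123, 456)

def Spec_f (n : Int) (m : Int) (out : Int) : Prop := out = f_alt n m
instance (n : Int) (m : Int) (out : Int) : Decidable (Spec_f n m out) := by unfold Spec_f; infer_instance

-- ===== CLAIM (what is proved, stated in full; the proofs are below) =====
def Claim_equal_f : Prop := ∀ (n : Int) (m : Int), Dom_f n m → Pre_f n m → Spec_f n m (f n m)

-- ===== LEMMAS AND PROOFS =====

-- product of the odd digits of a digit list (1 for each other digit)
def pvPO (ds : List Nat) : Int := (ds.map fun d : Nat => if d % 2 = 1 then (d : Int) else 1).prod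
-- product of the even nonzero digits of a digit list
def pvPE (ds : List Nat) : Int :=
  (ds.map fun d : Nat => if d % 2 = 1 then (1 : Int) else if d = 0 then 1 else (d : Int)).prod

lemma pvPO_reverse (ds : List Nat) : pvPO ds.reverse = pvPO ds := by
  unfold pvPO; rw [List.map_reverse, List.prod_reverse]

lemma pvPE_reverse (ds : List Nat) : pvPE ds.reverse = pvPE ds := by
  unfold pvPE; rw [List.map_reverse, List.prod_reverse]

-- the three character facts used to mediate between chars and digit values
lemma pvChar_facts (d : Nat) (hd : d < 10) :
    pvIntv (Nat.digitChar d) = (d : Int) ∧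
    pvPodd (Nat.digitChar d) = decide (d % 2 = 1) ∧
    pvPev (Nat.digitChar d) = decide (d % 2 ≠ 1 ∧ d ≠ 0) := by
  interval_cases d <;> exact ⟨by decide, by decide, by decide⟩

-- B's loop computes the two digit products
lemma pvLoop_spec : ∀ (fuel x : Nat) (op ep : Int), x ≤ fuel →
    pvLoop fuel x op ep = (op * pvPO (Nat.digits 10 x), ep * pvPE (Nat.digits 10 x)) := by
  intro fuel
  induction fuel with
  | zero =>
    intro x op ep hx
    have : x = 0 := Nat.le_zero.mp hx
    subst this
    simp [pvLoop, pvPO, pvPE]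
  | succ fuel ih =>
    intro x op ep hx
    by_cases h0 : x = 0
    · subst h0; simp [pvLoop, pvPO, pvPE]
    · have hdig : Nat.digits 10 x = x % 10 :: Nat.digits 10 (x / 10) :=
        Nat.digits_def' (by norm_num) (Nat.pos_of_ne_zero h0)
      have hle : x / 10 ≤ fuel := by
        have := Nat.div_lt_self (Nat.pos_of_ne_zero h0) (by norm_num : 1 < 10)
        omega
      simp only [pvLoop, h0, if_false]
      rw [ih (x / 10) _ _ hle, hdig]
      unfold pvPO pvPE
      simp only [List.map_cons, List.prod_cons, Prod.mk.injEq]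
      constructor <;> (split_ifs <;> first | ring1 | (exfalso; omega))

-- Nat.toDigits writes the base-10 digits, most significant first
lemma pvToDigitsCore_eq : ∀ (fuel n : Nat) (l : List Char), n < fuel → 0 < n →
    Nat.toDigitsCore 10 fuel n l = (Nat.digits 10 n).reverse.map Nat.digitChar ++ l := by
  intro fuel
  induction fuel with
  | zero => intro n l h _; omega
  | succ fuel ih =>
    intro n l h hn
    have hdig : Nat.digits 10 n = n % 10 :: Nat.digits 10 (n / 10) :=
      Nat.digits_def' (by norm_num) hn
    rw [hdig]
    simp only [Nat.toDigitsCore, List.reverse_cons, List.map_append, List.map_cons,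
      List.map_nil, List.append_assoc, List.singleton_append]
    by_cases hq : n / 10 = 0
    · simp [hq]
    · have hlt : n / 10 < fuel := by
        have := Nat.div_lt_self hn (by norm_num : 1 < 10)
        omega
      rw [if_neg hq, ih (n / 10) _ hlt (Nat.pos_of_ne_zero hq)]

-- generic filtered fold over digit characters, odd side
lemma pvFold_odd : ∀ (es : List Nat) (i : Int), (∀ d ∈ es, d < 10) →
    ((es.map Nat.digitChar).filter pvPodd).foldl (fun a c => a * pvIntv c) i = i * pvPO es := by
  intro es
  induction es with
  | nil => intro i _; simp [pvPO]
  | cons d t ih =>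
    intro i h
    have hd : d < 10 := h d (List.mem_cons_self)
    have ht : ∀ x ∈ t, x < 10 := fun x hx => h x (List.mem_cons_of_mem _ hx)
    obtain ⟨hv, hodd, -⟩ := pvChar_facts d hd
    simp only [List.map_cons, List.filter_cons, hodd]
    by_cases hp : d % 2 = 1
    · rw [if_pos (by simpa using hp)]
      simp only [List.foldl_cons, hv]
      rw [ih (i * (d : Int)) ht]
      unfold pvPO
      simp only [List.map_cons, List.prod_cons, if_pos hp]
      ring
    · rw [if_neg (by simpa using hp)]
      rw [ih i ht]
      unfold pvPO
      simp only [List.map_cons, List.prod_cons, if_neg hp]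
      ring

-- generic filtered fold over digit characters, even side
lemma pvFold_even : ∀ (es : List Nat) (i : Int), (∀ d ∈ es, d < 10) →
    ((es.map Nat.digitChar).filter pvPev).foldl (fun a c => a * pvIntv c) i = i * pvPE es := by
  intro es
  induction es with
  | nil => intro i _; simp [pvPE]
  | cons d t ih =>
    intro i h
    have hd : d < 10 := h d (List.mem_cons_self)
    have ht : ∀ x ∈ t, x < 10 := fun x hx => h x (List.mem_cons_of_mem _ hx)
    obtain ⟨hv, -, hev⟩ := pvChar_facts d hd
    simp only [List.map_cons, List.filter_cons, hev]
    by_cases hp : d % 2 ≠ 1 ∧ d ≠ 0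
    · rw [if_pos (by simpa using hp)]
      simp only [List.foldl_cons, hv]
      rw [ih (i * (d : Int)) ht]
      unfold pvPE
      simp only [List.map_cons, List.prod_cons, if_neg hp.1, if_neg hp.2]
      ring
    · rw [if_neg (by simpa using hp)]
      rw [ih i ht]
      unfold pvPE
      simp only [List.map_cons, List.prod_cons]
      by_cases h3 : d % 2 = 1
      · rw [if_pos h3]; ring
      · rw [if_neg h3, if_pos (by omega)]; ring

-- A's filtered fold over str(k), odd side, equals the odd digit product
lemma pvA_odd (k : Int) (hk : 0 ≤ k) (i : Int) :
    ((PySem.Int.toChars k).filter pvPodd).foldl (fun a c => a * pvIntv c) i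
      = i * pvPO (Nat.digits 10 k.toNat) := by
  have hchars : PySem.Int.toChars k = Nat.toDigits 10 k.toNat := by
    unfold PySem.Int.toChars; rw [if_neg (by omega)]
  rw [hchars]
  by_cases h0 : k.toNat = 0
  · rw [h0]
    have : Nat.toDigits 10 0 = ['0'] := by decide
    rw [this]
    simp [pvPodd, pvIntv, pvPO, PySem.Int.mod]
  · unfold Nat.toDigits
    rw [pvToDigitsCore_eq _ _ _ (Nat.lt_succ_self _) (Nat.pos_of_ne_zero h0), List.append_nil,
]
    rw [pvFold_odd _ i (fun d hd => Nat.digits_lt_base (by norm_num) (List.mem_reverse.mp hd)),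
      pvPO_reverse]

-- A's filtered fold over str(k), even side, equals the even nonzero digit product
lemma pvA_even (k : Int) (hk : 0 ≤ k) (i : Int) :
    ((PySem.Int.toChars k).filter pvPev).foldl (fun a c => a * pvIntv c) i
      = i * pvPE (Nat.digits 10 k.toNat) := by
  have hchars : PySem.Int.toChars k = Nat.toDigits 10 k.toNat := by
    unfold PySem.Int.toChars; rw [if_neg (by omega)]
  rw [hchars]
  by_cases h0 : k.toNat = 0
  · rw [h0]
    have : Nat.toDigits 10 0 = ['0'] := by decide
    rw [this]
    simp [pvPev, pvIntv, pvPE, PySem.Int.mod]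
  · unfold Nat.toDigits
    rw [pvToDigitsCore_eq _ _ _ (Nat.lt_succ_self _) (Nat.pos_of_ne_zero h0), List.append_nil,
]
    rw [pvFold_even _ i (fun d hd => Nat.digits_lt_base (by norm_num) (List.mem_reverse.mp hd)),
      pvPE_reverse]

-- ===== VERDICT (by name: the statement is the Claim_ definition above) =====
theorem f_spec : Claim_equal_f := by
  intro n m _ hpre
  obtain ⟨hn, hm⟩ := hpre
  unfold Spec_f f f_alt
  have han : n.natAbs = n.toNat := by omega
  have ham : m.natAbs = m.toNat := by omega
  rw [han, ham]
  rw [pvLoop_spec _ _ _ _ le_rfl]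
  simp only
  rw [pvLoop_spec _ _ _ _ le_rfl]
  simp only [List.foldl_append]
  rw [pvA_odd n hn 1, pvA_odd m hm _, pvA_even n hn 1, pvA_even m hm _]
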